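-- pv_equiv track=rewrite | github.com/Arsen1302/Code-copy-detector | TestData/solutions/problem_935_1.py | solution_935_1
-- ===== SOURCE A (Python) =====
-- from typing import List
--
-- def solution_935_1(satisfaction: List[int]) -> int:
--     satisfaction.sort(reverse=True)
--     solution_935_1 = dishSum = 0
--
--     for dish in satisfaction:
--         dishSum += dish
--         if dishSum <= 0:
--             break
--         solution_935_1 += dishSum
--
--     return solution_935_1
-- ===== SOURCE B (Python) =====
-- from typing import List
--
-- def solution_935_1(satisfaction: List[int]) -> int:
--     satisfaction.sort(reverse=True)
--     best = 0
--     for k in range(1, len(satisfaction) + 1):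
--         total = 0
--         for i in range(k):
--             total += satisfaction[i] * (k - i)
--         best = max(best, total)
--     return best
-- ===== Notes on version B (the rewrite author's own statement) =====
-- stated objective: alternative
-- what changed: Replaces A's single greedy prefix-sum sweep with early break by an exhaustive search: for every candidate count k it recomputes the full time-weighted total of the top k dishes in an inner pass and keeps the maximum (with 0), relying on a concavity argument for equality.
import Mathlib
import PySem

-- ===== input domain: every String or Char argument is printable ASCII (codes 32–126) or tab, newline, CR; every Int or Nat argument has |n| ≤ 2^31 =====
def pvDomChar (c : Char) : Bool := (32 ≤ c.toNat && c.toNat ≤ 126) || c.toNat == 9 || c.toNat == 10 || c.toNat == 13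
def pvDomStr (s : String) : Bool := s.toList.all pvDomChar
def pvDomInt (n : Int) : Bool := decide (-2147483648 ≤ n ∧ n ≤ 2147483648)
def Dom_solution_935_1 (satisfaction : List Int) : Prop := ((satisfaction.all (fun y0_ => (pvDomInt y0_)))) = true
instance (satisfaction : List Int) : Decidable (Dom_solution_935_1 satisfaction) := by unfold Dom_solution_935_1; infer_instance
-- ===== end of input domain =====

-- B replaces A's greedy prefix-sum sweep (early break) by an exhaustive max over every
-- candidate dish count, recomputing each weighted total in an inner pass ('alternative';
-- not faster). Both Pythons sort the argument in place; equivalence is about the return value.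

-- ===== PORT A =====
-- the for-loop with running dishSum, accumulator, and 'break'
def pvLoopA : List Int → Int → Int → Int
  | [], ans, _ => ans
  | dish :: rest, ans, dishSum =>
    let ds := dishSum + dish
    if ds ≤ 0 then ans else pvLoopA rest (ans + ds) ds

def solution_935_1 (satisfaction : List Int) : Int :=
  pvLoopA (PySem.List.sorted satisfaction (fun x => x) true) 0 0

-- ===== PORT B =====
-- inner loop: total = sum over i in range(k) of t[i]*(k-i); i < k ≤ len t, so the index
-- is always in range and getD is exact
def pvInner (t : List Int) (k : Nat) : Int :=
  (List.range k).foldl (fun total i => total + t.getD i 0 * ((k : Int) - (i : Int))) 0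

-- outer loop: 'for k in range(1, len(t)+1)' written as k'+1 for k' in range(len t)
def solution_935_1_alt (satisfaction : List Int) : Int :=
  let t := PySem.List.sorted satisfaction (fun x => x) true
  (List.range t.length).foldl (fun best k => max best (pvInner t (k + 1))) 0

-- ===== PRECONDITION & SPEC =====
def Spec_solution_935_1 (satisfaction : List Int) (out : Int) : Prop := out = solution_935_1_alt satisfaction
instance (satisfaction : List Int) (out : Int) : Decidable (Spec_solution_935_1 satisfaction out) := by unfold Spec_solution_935_1; infer_instance

-- ===== CLAIM (what is proved, stated in full; the proofs are below) =====
def Claim_equal_solution_935_1 : Prop := ∀ (satisfaction : List Int), Dom_solution_935_1 satisfaction → Spec_solution_935_1 satisfaction (solution_935_1 satisfaction)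

-- ===== LEMMAS AND PROOFS =====

-- P t j: sum of the first j entries (prefix sum); W t k: weighted total of the top k dishes
def pvP (t : List Int) (j : Nat) : Int := ∑ i ∈ Finset.range j, t.getD i 0
def pvW (t : List Int) (k : Nat) : Int := ∑ i ∈ Finset.range k, t.getD i 0 * ((k : Int) - (i : Int))

-- greedy stopping index: from j, keep taking dishes while the next prefix sum is positive
def pvE (t : List Int) (j : Nat) : Nat :=
  if h : j < t.length ∧ 0 < pvP t (j + 1) then pvE t (j + 1) else j
  termination_by t.length - j
  decreasing_by omega

lemma pvP_succ (t : List Int) (j : Nat) : pvP t (j + 1) = pvP t j + t.getD j 0 := by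
  simp [pvP, Finset.sum_range_succ]

lemma pvW_succ (t : List Int) (k : Nat) : pvW t (k + 1) = pvW t k + pvP t (k + 1) := by
  have h : ∀ i : Nat, t.getD i 0 * (((k + 1 : Nat) : Int) - (i : Int))
      = t.getD i 0 * ((k : Int) - (i : Int)) + t.getD i 0 := by
    intro i; push_cast; ring
  unfold pvW pvP
  rw [show (∑ i ∈ Finset.range (k + 1), t.getD i 0 * (((k + 1 : Nat) : Int) - (i : Int)))
      = ∑ i ∈ Finset.range (k + 1), (t.getD i 0 * ((k : Int) - (i : Int)) + t.getD i 0) from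
      Finset.sum_congr rfl (fun i _ => h i)]
  rw [Finset.sum_add_distrib, Finset.sum_range_succ (fun i => t.getD i 0 * ((k : Int) - (i : Int)))]
  ring

lemma foldl_add_eq_sum (f : Nat → Int) (k : Nat) :
    (List.range k).foldl (fun a i => a + f i) 0 = ∑ i ∈ Finset.range k, f i := by
  induction k with
  | zero => simp
  | succ k ih => rw [List.range_succ, List.foldl_append, ih, Finset.sum_range_succ]; simp

lemma pvInner_eq (t : List Int) (k : Nat) : pvInner t k = pvW t k :=
  foldl_add_eq_sum (fun i => t.getD i 0 * ((k : Int) - (i : Int))) k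

lemma pvLoopA_acc (t : List Int) (ans ds : Int) :
    pvLoopA t ans ds = ans + pvLoopA t 0 ds := by
  induction t generalizing ans ds with
  | nil => simp [pvLoopA]
  | cons d rest ih =>
    simp only [pvLoopA]
    by_cases h : ds + d ≤ 0
    · simp [h]
    · simp only [h, if_false]
      rw [ih (ans + (ds + d)), ih (0 + (ds + d))]
      ring

-- A's loop from index j, started with the prefix sum P j, lands at W (pvE t j)
lemma pvLoopA_drop (t : List Int) (j : Nat) :
    pvW t j + pvLoopA (t.drop j) 0 (pvP t j) = pvW t (pvE t j) := by
  by_cases hj : j < t.length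
  · rw [List.drop_eq_getElem_cons hj]
    have hget : t.getD j 0 = t[j] := List.getD_eq_getElem t 0 hj
    have hds : pvP t j + t[j] = pvP t (j + 1) := by rw [pvP_succ, hget]
    by_cases hpos : 0 < pvP t (j + 1)
    · have hstop : pvE t j = pvE t (j + 1) := by rw [pvE]; simp [hj, hpos]
      have ihle : t.length - (j + 1) < t.length - j := by omega
      have ih := pvLoopA_drop t (j + 1)
      simp only [pvLoopA, hds]
      have hnle : ¬ pvP t (j + 1) ≤ 0 := not_le.mpr hpos
      simp only [hnle, if_false]
      rw [pvLoopA_acc, hstop, ← ih, pvW_succ]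
      ring
    · have hstop : pvE t j = j := by rw [pvE]; simp [hpos]
      simp only [pvLoopA, hds]
      have hle : pvP t (j + 1) ≤ 0 := not_lt.mp hpos
      simp [hle, hstop]
  · have hdrop : t.drop j = [] := List.drop_eq_nil_of_le (by omega)
    have hstop : pvE t j = j := by rw [pvE]; simp [hj]
    simp [hdrop, pvLoopA, hstop]
  termination_by t.length - j
  decreasing_by omega

lemma pvE_ge (t : List Int) (j : Nat) : j ≤ pvE t j := by
  rw [pvE]
  split
  · exact le_trans (by omega) (pvE_ge t (j + 1))
  · exact le_refl j
  termination_by t.length - j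
  decreasing_by rename_i h; omega

lemma pvE_le (t : List Int) (j : Nat) (hj : j ≤ t.length) : pvE t j ≤ t.length := by
  rw [pvE]
  split
  · rename_i h; exact pvE_le t (j + 1) (by omega)
  · exact hj
  termination_by t.length - j
  decreasing_by rename_i h; omega

lemma pvE_pos (t : List Int) (j : Nat) :
    ∀ i, j < i → i ≤ pvE t j → 0 < pvP t i := by
  rw [pvE]
  split
  · rename_i h
    intro i hji hie
    rcases Nat.eq_or_lt_of_le (Nat.succ_le_of_lt hji) with he | hlt
    · rw [← he]; exact h.2
    · exact pvE_pos t (j + 1) i hlt hie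
  · intro i hji hie; omega
  termination_by t.length - j
  decreasing_by rename_i h; omega

lemma pvE_stop (t : List Int) (j : Nat) :
    pvE t j < t.length → pvP t (pvE t j + 1) ≤ 0 := by
  rw [pvE]
  split
  · exact pvE_stop t (j + 1)
  · rename_i h
    intro hlt
    by_contra hpos
    exact h ⟨hlt, not_le.mp hpos⟩
  termination_by t.length - j
  decreasing_by rename_i h; omega

-- sorted descending: one nonpositive prefix sum forces every later entry ≤ 0
lemma tail_nonpos (t : List Int) (hs : t.Pairwise (fun a b => b ≤ a))
    (j : Nat) (hj : 1 ≤ j) (hP : pvP t j ≤ 0) :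
    ∀ i, j - 1 ≤ i → t.getD i 0 ≤ 0 := by
  have hmono : ∀ p q : Nat, p ≤ q → q < t.length → t.getD q 0 ≤ t.getD p 0 := by
    intro p q hpq hq
    rcases Nat.eq_or_lt_of_le hpq with he | hlt
    · rw [he]
    · rw [List.getD_eq_getElem t 0 hq, List.getD_eq_getElem t 0 (lt_trans hlt hq)]
      exact (List.pairwise_iff_getElem.mp hs) p q (lt_trans hlt hq) hq hlt
  intro i hi
  by_cases hiL : i < t.length
  · -- first: the (j-1)-th entry is ≤ 0, because j · t[j-1] ≤ P j ≤ 0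
    have hj1L : j - 1 < t.length := by omega
    have hbound : (j : Int) * t.getD (j - 1) 0 ≤ pvP t j := by
      have h1 : ∀ x ∈ Finset.range j, t.getD (j - 1) 0 ≤ t.getD x 0 := by
        intro x hx
        have hxj : x < j := Finset.mem_range.mp hx
        by_cases hxm : x ≤ j - 1
        · by_cases hxL : j - 1 < t.length
          · exact hmono x (j - 1) hxm hj1L
          · omega
        · omega
      have := Finset.card_nsmul_le_sum (Finset.range j) (fun x => t.getD x 0) (t.getD (j - 1) 0) h1
      simpa [pvP, nsmul_eq_mul] using this
    have hj1 : t.getD (j - 1) 0 ≤ 0 := by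
      by_cases hc : 0 < t.getD (j - 1) 0
      case neg => omega
      · exfalso
        have : (0 : Int) < (j : Int) * t.getD (j - 1) 0 :=
          mul_pos (by exact_mod_cast hj) hc
        omega
    calc t.getD i 0 ≤ t.getD (j - 1) 0 := hmono (j - 1) i hi hiL
      _ ≤ 0 := hj1
  · rw [List.getD_eq_default t 0 (by omega)]

lemma pvP_nonpos_after (t : List Int) (hs : t.Pairwise (fun a b => b ≤ a))
    (j : Nat) (hj : 1 ≤ j) (hP : pvP t j ≤ 0) :
    ∀ i, j ≤ i → pvP t i ≤ 0 := by
  intro i hi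
  induction i with
  | zero => omega
  | succ i ih =>
    rcases Nat.eq_or_lt_of_le hi with he | hlt
    · rw [← he]; exact hP
    · have hi' : j ≤ i := by omega
      have := tail_nonpos t hs j hj hP i (by omega)
      rw [pvP_succ]
      have := ih hi'
      omega

lemma pvW_antitone (t : List Int) (a : Nat) :
    ∀ b, a ≤ b → (∀ i, a < i → i ≤ b → pvP t i ≤ 0) → pvW t b ≤ pvW t a := by
  intro b
  induction b with
  | zero => intro hab _; interval_cases a; exact le_refl _
  | succ b ih =>
    intro hab hP
    rcases Nat.eq_or_lt_of_le hab with he | hlt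
    · rw [he]
    · have hab' : a ≤ b := by omega
      have h1 : pvW t (b + 1) = pvW t b + pvP t (b + 1) := pvW_succ t b
      have h2 : pvP t (b + 1) ≤ 0 := hP (b + 1) (by omega) (le_refl _)
      have h3 : pvW t b ≤ pvW t a := ih hab' (fun i hi hib => hP i hi (by omega))
      omega

-- B's outer loop equals W (min e k), where e is the greedy stopping index
lemma pvFold_eq (t : List Int) (hs : t.Pairwise (fun a b => b ≤ a)) :
    ∀ k, k ≤ t.length →
      (List.range k).foldl (fun best k' => max best (pvInner t (k' + 1))) 0
        = pvW t (min (pvE t 0) k) := by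
  intro k
  induction k with
  | zero => intro _; simp [pvW]
  | succ k ih =>
    intro hk
    rw [List.range_succ, List.foldl_append, ih (by omega)]
    simp only [List.foldl_cons, List.foldl_nil, pvInner_eq]
    by_cases hke : k + 1 ≤ pvE t 0
    · have hmin1 : min (pvE t 0) k = k := by omega
      have hmin2 : min (pvE t 0) (k + 1) = k + 1 := by omega
      rw [hmin1, hmin2, pvW_succ]
      have hpos : 0 < pvP t (k + 1) := pvE_pos t 0 (k + 1) (by omega) hke
      have : pvW t k ≤ pvW t k + pvP t (k + 1) := by omega
      omega
    · have he : pvE t 0 ≤ k := by omega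
      have hmin1 : min (pvE t 0) k = pvE t 0 := by omega
      have hmin2 : min (pvE t 0) (k + 1) = pvE t 0 := by omega
      rw [hmin1, hmin2]
      have heL : pvE t 0 < t.length := by omega
      have hstop : pvP t (pvE t 0 + 1) ≤ 0 := pvE_stop t 0 heL
      have hall : ∀ i, pvE t 0 < i → i ≤ k + 1 → pvP t i ≤ 0 := by
        intro i hi _
        exact pvP_nonpos_after t hs (pvE t 0 + 1) (by omega) hstop i (by omega)
      have hle : pvW t (k + 1) ≤ pvW t (pvE t 0) :=
        pvW_antitone t (pvE t 0) (k + 1) (by omega) hall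
      omega

-- ===== VERDICT (by name: the statement is the Claim_ definition above) =====
theorem solution_935_1_spec : Claim_equal_solution_935_1 := by
  intro satisfaction _
  unfold Spec_solution_935_1 solution_935_1 solution_935_1_alt
  set t := PySem.List.sorted satisfaction (fun x => x) true with ht
  have hs : t.Pairwise (fun a b => b ≤ a) := by
    simpa using PySem.List.sorted_pairwise_rev (xs := satisfaction) (key := fun x => x)
  have hA : pvLoopA t 0 0 = pvW t (pvE t 0) := by
    have := pvLoopA_drop t 0
    simpa [pvW, pvP] using this
  have hB := pvFold_eq t hs t.length (le_refl _)
  have hmin : min (pvE t 0) t.length = pvE t 0 := by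
    have := pvE_le t 0 (by omega)
    omega
  rw [hA, hB, hmin]
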